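-- pv_equiv track=rewrite | github.com/Main-Roads/merge-segments | benchmarks/compare_merges.py | _detect_from_to_columns
-- ===== SOURCE A (Python) =====
-- def _normalize_column_name(col: str) -> str:
--     """Normalize column name to lowercase and remove common separators."""
--     return col.lower().replace("_", "").replace(" ", "")
--
-- def _detect_from_to_columns(columns: list[str]) -> tuple[str, str] | None:
--     """Detect from/to columns with various naming patterns."""
--     normalized_cols = {_normalize_column_name(c): c for c in columns}
--
--     # Patterns for 'from' column
--     from_patterns = [
--         "slkfrom",
--         "fromslk",
--         "startslk",
--         "slkstart",
--         "truefrom",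
--         "fromtrue",
--         "starttrue",
--         "truestart",
--         "from",
--         "start",
--     ]
--
--     # Patterns for 'to' column
--     to_patterns = [
--         "slkto",
--         "toslk",
--         "endslk",
--         "slkend",
--         "trueto",
--         "totrue",
--         "endtrue",
--         "trueend",
--         "to",
--         "end",
--     ]
--
--     from_col = None
--     to_col = None
--
--     # Find 'from' column
--     for pattern in from_patterns:
--         if pattern in normalized_cols:
--             from_col = normalized_cols[pattern]
--             break
--
--     # Find 'to' column
--     for pattern in to_patterns:
--         if pattern in normalized_cols:
--             to_col = normalized_cols[pattern]
--             break
--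
--     if from_col and to_col:
--         return (from_col, to_col)
--     return None
-- ===== SOURCE B (Python) =====
-- _FROM_PATTERNS = [
--     "slkfrom", "fromslk", "startslk", "slkstart", "truefrom",
--     "fromtrue", "starttrue", "truestart", "from", "start",
-- ]
-- _TO_PATTERNS = [
--     "slkto", "toslk", "endslk", "slkend", "trueto",
--     "totrue", "endtrue", "trueend", "to", "end",
-- ]
-- _FROM_RANK = {p: i for i, p in enumerate(_FROM_PATTERNS)}
-- _TO_RANK = {p: i for i, p in enumerate(_TO_PATTERNS)}
--
--
-- def _detect_from_to_columns(columns):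
--     """Detect from/to columns in one pass over the columns, driven by rank tables."""
--     from_best = None  # (rank, column); lower rank wins, later column wins ties
--     to_best = None
--     for col in columns:
--         key = col.lower().replace("_", "").replace(" ", "")
--         r = _FROM_RANK.get(key)
--         if r is not None and (from_best is None or r <= from_best[0]):
--             from_best = (r, col)
--         r = _TO_RANK.get(key)
--         if r is not None and (to_best is None or r <= to_best[0]):
--             to_best = (r, col)
--     from_col = from_best[1] if from_best else None
--     to_col = to_best[1] if to_best else None
--     if from_col and to_col:
--         return (from_col, to_col)
--     return None
-- ===== Notes on version B (the rewrite author's own statement) =====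
-- stated objective: alternative
-- what changed: Replaces A's dict comprehension plus two ordered pattern-probe loops with a single pass over the columns driven by precomputed pattern-to-rank tables, keeping the lowest-ranked (and, on equal normalized names, latest) column for each of from/to.
import Mathlib
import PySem

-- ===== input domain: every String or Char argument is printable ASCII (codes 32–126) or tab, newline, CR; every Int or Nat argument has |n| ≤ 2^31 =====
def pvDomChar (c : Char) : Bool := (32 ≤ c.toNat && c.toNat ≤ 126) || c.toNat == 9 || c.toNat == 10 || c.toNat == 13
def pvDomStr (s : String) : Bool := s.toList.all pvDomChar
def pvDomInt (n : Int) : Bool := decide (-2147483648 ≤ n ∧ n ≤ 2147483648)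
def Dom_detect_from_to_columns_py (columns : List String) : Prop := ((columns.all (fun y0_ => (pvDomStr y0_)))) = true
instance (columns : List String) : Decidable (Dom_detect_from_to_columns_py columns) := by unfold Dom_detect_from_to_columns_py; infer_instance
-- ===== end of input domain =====

-- B replaces A's two ordered pattern-probe loops over the normalized-name dict by one pass
-- over the columns driven by precomputed pattern→rank tables (alternative decomposition).

-- ===== PORT A =====

-- _normalize_column_name
def pvNormalize (col : String) : String :=
  PySem.Str.replace (PySem.Str.replace (PySem.Str.lower col) "_" "") " " ""

def pvFromPatterns : List String :=
  ["slkfrom", "fromslk", "startslk", "slkstart", "truefrom",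
   "fromtrue", "starttrue", "truestart", "from", "start"]

def pvToPatterns : List String :=
  ["slkto", "toslk", "endslk", "slkend", "trueto",
   "totrue", "endtrue", "trueend", "to", "end"]

-- the shared final 'if from_col and to_col: return (from_col, to_col); return None'
def pvFinish (from_col to_col : Option String) : Option (String × String) :=
  match from_col, to_col with
  | some f, some t => if f != "" && t != "" then some (f, t) else none
  | _, _ => none

-- the 'for pattern in …: if pattern in normalized_cols: …; break' loop
def pvFindPattern (d : PySem.Dict String String) : List String → Option String
  | [] => none
  | p :: ps => if d.contains p then d.get? p else pvFindPattern d ps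

def detect_from_to_columns_py (columns : List String) : Option (String × String) :=
  let normalized_cols := columns.foldl (fun d c => d.insert (pvNormalize c) c) PySem.Dict.empty
  let from_col := pvFindPattern normalized_cols pvFromPatterns
  let to_col := pvFindPattern normalized_cols pvToPatterns
  pvFinish from_col to_col

-- ===== PORT B =====

-- _FROM_RANK / _TO_RANK = {p: i for i, p in enumerate(patterns)}
def pvRankDict (ps : List String) : PySem.Dict String Int :=
  PySem.Dict.ofList ((PySem.List.enumerate ps).map (fun ip => (ip.2, ip.1)))

def pvFromRank : PySem.Dict String Int := pvRankDict pvFromPatterns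
def pvToRank : PySem.Dict String Int := pvRankDict pvToPatterns

-- one 'r = RANK.get(key); if r is not None and (best is None or r <= best[0]): best = (r, col)' step
def pvBStep (R : PySem.Dict String Int) (s : Option (Int × String)) (c : String) : Option (Int × String) :=
  match R.get? (pvNormalize c) with
  | none => s
  | some r =>
    match s with
    | none => some (r, c)
    | some (r0, _) => if r ≤ r0 then some (r, c) else s

def detect_from_to_columns_py_alt (columns : List String) : Option (String × String) :=
  let st := columns.foldl
    (fun (s : Option (Int × String) × Option (Int × String)) c =>
      (pvBStep pvFromRank s.1 c, pvBStep pvToRank s.2 c)) (none, none)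
  let from_col := st.1.map (·.2)
  let to_col := st.2.map (·.2)
  pvFinish from_col to_col

-- ===== PRECONDITION & SPEC =====
def Spec_detect_from_to_columns_py (columns : List String) (out : Option (String × String)) : Prop := out = detect_from_to_columns_py_alt columns
instance (columns : List String) (out : Option (String × String)) : Decidable (Spec_detect_from_to_columns_py columns out) := by unfold Spec_detect_from_to_columns_py; infer_instance

-- ===== CLAIM (what is proved, stated in full; the proofs are below) =====
def Claim_equal_detect_from_to_columns_py : Prop := ∀ (columns : List String), Dom_detect_from_to_columns_py columns → Spec_detect_from_to_columns_py columns (detect_from_to_columns_py columns)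

-- ===== LEMMAS AND PROOFS =====

-- the rank dict R is a correct index of the pattern list P
def pvRankOk (P : List String) (R : PySem.Dict String Int) : Prop :=
  (∀ k r, R.get? k = some r → ∃ n : Nat, r = (n : Int) ∧ P[n]? = some k) ∧
  (∀ k, R.get? k = none → k ∉ P)

-- loop invariant tying A's dict to B's best-so-far state
def pvInv (P : List String) (d : PySem.Dict String String) (s : Option (Int × String)) : Prop :=
  match s with
  | none => ∀ p ∈ P, d.contains p = false
  | some (r, c) => ∃ n : Nat, r = (n : Int) ∧ P[n]? = some (pvNormalize c) ∧
      d.get? (pvNormalize c) = some c ∧ d.contains (pvNormalize c) = true ∧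
      ∀ j, j < n → ∀ p, P[j]? = some p → d.contains p = false

lemma pvNodup_ne {P : List String} (hnd : P.Nodup) {i j : Nat} {p q : String}
    (hi : P[i]? = some p) (hj : P[j]? = some q) (hij : i ≠ j) : p ≠ q := by
  rw [List.getElem?_eq_some_iff] at hi hj
  obtain ⟨hi1, hi2⟩ := hi; obtain ⟨hj1, hj2⟩ := hj
  subst hi2; subst hj2
  intro h
  have hinj := List.nodup_iff_injective_getElem.mp hnd
  have : (⟨i, hi1⟩ : Fin P.length) = ⟨j, hj1⟩ := hinj h
  exact hij (by simpa using this)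

lemma pvContainsInsertNe (d : PySem.Dict String String) (k v p : String) (hne : p ≠ k) :
    (d.insert k v).contains p = d.contains p := by
  rw [PySem.Dict.contains_insert, beq_eq_false_iff_ne.mpr hne, Bool.false_or]

lemma pvStep (P : List String) (R : PySem.Dict String Int) (hR : pvRankOk P R) (hnd : P.Nodup)
    (d : PySem.Dict String String) (s : Option (Int × String)) (c : String)
    (h : pvInv P d s) : pvInv P (d.insert (pvNormalize c) c) (pvBStep R s c) := by
  unfold pvBStep
  cases hr : R.get? (pvNormalize c) with
  | none =>
    have hnotin : pvNormalize c ∉ P := hR.2 _ hr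
    cases s with
    | none =>
      simp only [pvInv] at h ⊢
      intro p hp
      have hne : p ≠ pvNormalize c := fun e => hnotin (e ▸ hp)
      rw [pvContainsInsertNe d _ c p hne]
      exact h p hp
    | some rc =>
      obtain ⟨r0, c0⟩ := rc
      simp only [pvInv] at h ⊢
      obtain ⟨n, hn, hp0, hg0, hc0, hlt0⟩ := h
      have hmem : pvNormalize c0 ∈ P := List.mem_of_getElem? hp0
      have hne : pvNormalize c0 ≠ pvNormalize c := fun e => hnotin (e ▸ hmem)
      refine ⟨n, hn, hp0, ?_, ?_, ?_⟩
      · rw [PySem.Dict.get?_insert_of_ne d c hne]; exact hg0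
      · rw [pvContainsInsertNe d _ c _ hne]; exact hc0
      · intro j hj p hp
        have hpm : p ∈ P := List.mem_of_getElem? hp
        have : p ≠ pvNormalize c := fun e => hnotin (e ▸ hpm)
        rw [pvContainsInsertNe d _ c p this]
        exact hlt0 j hj p hp
  | some r =>
    obtain ⟨m, rfl, hPm⟩ := hR.1 _ _ hr
    cases s with
    | none =>
      simp only [pvInv] at h ⊢
      refine ⟨m, rfl, hPm, PySem.Dict.get?_insert_self d (pvNormalize c) c,
        PySem.Dict.contains_insert_self d (pvNormalize c) c, ?_⟩
      intro j hj p hp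
      have hne : p ≠ pvNormalize c := pvNodup_ne hnd hp hPm (by omega)
      rw [pvContainsInsertNe d _ c p hne]
      exact h p (List.mem_of_getElem? hp)
    | some rc =>
      obtain ⟨r0, c0⟩ := rc
      simp only [pvInv] at h
      obtain ⟨n, hn, hp0, hg0, hc0, hlt0⟩ := h
      subst hn
      dsimp only
      by_cases hle : (m : Int) ≤ (n : Int)
      · -- r ≤ r0 : new best is (r, c)
        rw [if_pos hle]
        simp only [pvInv]
        have hmn : m ≤ n := by exact_mod_cast hle
        refine ⟨m, rfl, hPm, PySem.Dict.get?_insert_self d (pvNormalize c) c,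
          PySem.Dict.contains_insert_self d (pvNormalize c) c, ?_⟩
        intro j hj p hp
        have hne : p ≠ pvNormalize c := pvNodup_ne hnd hp hPm (by omega)
        rw [pvContainsInsertNe d _ c p hne]
        exact hlt0 j (by omega) p hp
      · -- r > r0 : best unchanged
        rw [if_neg hle]
        simp only [pvInv]
        have hnm : n < m := by exact_mod_cast lt_of_not_ge hle
        have hne : pvNormalize c0 ≠ pvNormalize c := pvNodup_ne hnd hp0 hPm (by omega)
        refine ⟨n, rfl, hp0, ?_, ?_, ?_⟩
        · rw [PySem.Dict.get?_insert_of_ne d c hne]; exact hg0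
        · rw [pvContainsInsertNe d _ c _ hne]; exact hc0
        · intro j hj p hp
          have : p ≠ pvNormalize c := pvNodup_ne hnd hp hPm (by omega)
          rw [pvContainsInsertNe d _ c p this]
          exact hlt0 j hj p hp

lemma pvFoldInv (P : List String) (R : PySem.Dict String Int) (hR : pvRankOk P R) (hnd : P.Nodup)
    (columns : List String) (d : PySem.Dict String String) (s : Option (Int × String))
    (h : pvInv P d s) :
    pvInv P (columns.foldl (fun d c => d.insert (pvNormalize c) c) d)
            (columns.foldl (pvBStep R) s) := by
  induction columns generalizing d s with
  | nil => exact h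
  | cons c cs ih => exact ih _ _ (pvStep P R hR hnd d s c h)

lemma pvFind_none (d : PySem.Dict String String) (P : List String)
    (h : ∀ p ∈ P, d.contains p = false) : pvFindPattern d P = none := by
  induction P with
  | nil => rfl
  | cons p ps ih =>
    simp only [pvFindPattern, h p (by simp)]
    exact ih (fun q hq => h q (by simp [hq]))

lemma pvFind_some (d : PySem.Dict String String) (P : List String) (n : Nat) (c p : String)
    (hp : P[n]? = some p) (hg : d.get? p = some c) (hc : d.contains p = true)
    (hlt : ∀ j, j < n → ∀ q, P[j]? = some q → d.contains q = false) :
    pvFindPattern d P = some c := by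
  induction P generalizing n with
  | nil => simp at hp
  | cons q qs ih =>
    cases n with
    | zero =>
      simp only [List.getElem?_cons_zero, Option.some.injEq] at hp
      subst hp
      simp [pvFindPattern, hc, hg]
    | succ m =>
      have h0 : d.contains q = false := hlt 0 (Nat.succ_pos m) q rfl
      simp only [pvFindPattern, h0, Bool.false_eq_true, if_false]
      exact ih m (by simpa using hp) (fun j hj r hr => hlt (j+1) (by omega) r (by simpa using hr))

-- pair fold splits into two independent folds
lemma pvFoldPair (columns : List String) (s t : Option (Int × String)) :
    columns.foldl (fun (st : Option (Int × String) × Option (Int × String)) c =>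
      (pvBStep pvFromRank st.1 c, pvBStep pvToRank st.2 c)) (s, t)
    = (columns.foldl (pvBStep pvFromRank) s, columns.foldl (pvBStep pvToRank) t) := by
  induction columns generalizing s t with
  | nil => rfl
  | cons c cs ih => simp only [List.foldl_cons]; exact ih _ _

lemma pvRankOkOf (P : List String) (R : PySem.Dict String Int)
    (h1 : ∀ k r, R.get? k = some r → ∃ n : Nat, r = (n : Int) ∧ P[n]? = some k)
    (h2 : ∀ k, R.get? k = none → k ∉ P) : pvRankOk P R := ⟨h1, h2⟩

set_option maxHeartbeats 1600000 in
lemma pvFromRankOk : pvRankOk pvFromPatterns pvFromRank := by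
  have e : pvFromRank = PySem.Dict.mk [("slkfrom",0),("fromslk",1),("startslk",2),("slkstart",3),("truefrom",4),("fromtrue",5),("starttrue",6),("truestart",7),("from",8),("start",9)] := by rfl
  refine pvRankOkOf _ _ ?_ ?_
  · intro k r h
    rw [e] at h
    clear e
    simp only [PySem.Dict.get?_mk_cons, beq_iff_eq] at h
    split_ifs at h
    · exact ⟨0, by simp_all [pvFromPatterns]⟩
    · exact ⟨1, by simp_all [pvFromPatterns]⟩
    · exact ⟨2, by simp_all [pvFromPatterns]⟩
    · exact ⟨3, by simp_all [pvFromPatterns]⟩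
    · exact ⟨4, by simp_all [pvFromPatterns]⟩
    · exact ⟨5, by simp_all [pvFromPatterns]⟩
    · exact ⟨6, by simp_all [pvFromPatterns]⟩
    · exact ⟨7, by simp_all [pvFromPatterns]⟩
    · exact ⟨8, by simp_all [pvFromPatterns]⟩
    · exact ⟨9, by simp_all [pvFromPatterns]⟩
    · simp [PySem.Dict.get?] at h
  · intro k h
    rw [e] at h
    clear e
    simp only [PySem.Dict.get?_mk_cons, beq_iff_eq] at h
    split_ifs at h
    all_goals simp_all [pvFromPatterns, eq_comm]

set_option maxHeartbeats 1600000 in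
lemma pvToRankOk : pvRankOk pvToPatterns pvToRank := by
  have e : pvToRank = PySem.Dict.mk [("slkto",0),("toslk",1),("endslk",2),("slkend",3),("trueto",4),("totrue",5),("endtrue",6),("trueend",7),("to",8),("end",9)] := by rfl
  refine pvRankOkOf _ _ ?_ ?_
  · intro k r h
    rw [e] at h
    clear e
    simp only [PySem.Dict.get?_mk_cons, beq_iff_eq] at h
    split_ifs at h
    · exact ⟨0, by simp_all [pvToPatterns]⟩
    · exact ⟨1, by simp_all [pvToPatterns]⟩
    · exact ⟨2, by simp_all [pvToPatterns]⟩
    · exact ⟨3, by simp_all [pvToPatterns]⟩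
    · exact ⟨4, by simp_all [pvToPatterns]⟩
    · exact ⟨5, by simp_all [pvToPatterns]⟩
    · exact ⟨6, by simp_all [pvToPatterns]⟩
    · exact ⟨7, by simp_all [pvToPatterns]⟩
    · exact ⟨8, by simp_all [pvToPatterns]⟩
    · exact ⟨9, by simp_all [pvToPatterns]⟩
    · simp [PySem.Dict.get?] at h
  · intro k h
    rw [e] at h
    clear e
    simp only [PySem.Dict.get?_mk_cons, beq_iff_eq] at h
    split_ifs at h
    all_goals simp_all [pvToPatterns, eq_comm]

lemma pvFind_eq (P : List String) (R : PySem.Dict String Int) (hR : pvRankOk P R) (hnd : P.Nodup)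
    (columns : List String) :
    pvFindPattern (columns.foldl (fun d c => d.insert (pvNormalize c) c) PySem.Dict.empty) P
    = (columns.foldl (pvBStep R) none).map (·.2) := by
  have h := pvFoldInv P R hR hnd columns PySem.Dict.empty none
    (by intro p _; exact PySem.Dict.contains_empty p)
  cases hs : columns.foldl (pvBStep R) none with
  | none => rw [hs] at h; exact pvFind_none _ _ h
  | some rc =>
    rw [hs] at h
    obtain ⟨r, c⟩ := rc
    obtain ⟨n, _, hp, hg, hc, hlt⟩ := h
    simpa using pvFind_some _ _ n c _ hp hg hc hlt

-- ===== VERDICT (by name: the statement is the Claim_ definition above) =====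
theorem detect_from_to_columns_py_spec : Claim_equal_detect_from_to_columns_py := by
  intro columns _
  unfold Spec_detect_from_to_columns_py detect_from_to_columns_py detect_from_to_columns_py_alt
  have hF := pvFind_eq pvFromPatterns pvFromRank pvFromRankOk (by decide) columns
  have hT := pvFind_eq pvToPatterns pvToRank pvToRankOk (by decide) columns
  simp only [pvFoldPair, hF, hT]
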